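-- pv_equiv track=rewrite | github.com/g4ndr1k/Personal-Wealth-Management | bridge/pdf_verify.py | _issue_mentions_unsupported_fact
-- ===== SOURCE A (Python) =====
-- def _issue_mentions_unsupported_fact(issue: dict, statement: dict) -> bool:
--     text = " ".join([
--         issue.get("type", ""),
--         issue.get("message", ""),
--         issue.get("evidence", ""),
--     ])
--     allowed_years = {
--         value[-4:]
--         for value in (
--             statement.get("period_start", ""),
--             statement.get("period_end", ""),
--             statement.get("print_date", ""),
--         )
--         if isinstance(value, str) and len(value) >= 4 and value[-4:].isdigit()
--     }
--     for token in text.replace("/", "-").split():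
--         if len(token) >= 4:
--             for part in token.split("-"):
--                 if len(part) == 4 and part.isdigit() and part not in allowed_years:
--                     return True
--     return False
-- ===== SOURCE B (Python) =====
-- def _issue_mentions_unsupported_fact(issue: dict, statement: dict) -> bool:
--     allowed_years = {
--         value[-4:]
--         for value in (
--             statement.get("period_start", ""),
--             statement.get("period_end", ""),
--             statement.get("print_date", ""),
--         )
--         if isinstance(value, str) and len(value) >= 4 and value[-4:].isdigit()
--     }
--     text = " ".join([
--         issue.get("type", ""),
--         issue.get("message", ""),
--         issue.get("evidence", ""),
--     ])
--     # single character-level scan: a "part" is a maximal run of characters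
--     # delimited by whitespace, '-' or '/'; flush each run as it ends.
--     found = False
--     run = ""
--     for ch in text + " ":  # trailing space flushes the final run
--         if ch.isspace() or ch == "-" or ch == "/":
--             if len(run) == 4 and run.isdigit() and run not in allowed_years:
--                 found = True
--             run = ""
--         else:
--             run += ch
--     return found
-- ===== Notes on version B (the rewrite author's own statement) =====
-- stated objective: alternative
-- what changed: Replaces A's replace('/','-') / whitespace-split / '-'-split tokenization pipeline with a single character-level state machine that scans the text once, flushing each maximal run at whitespace, '-' or '/' and checking 4-digit runs against the allowed set.
import Mathlib
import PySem

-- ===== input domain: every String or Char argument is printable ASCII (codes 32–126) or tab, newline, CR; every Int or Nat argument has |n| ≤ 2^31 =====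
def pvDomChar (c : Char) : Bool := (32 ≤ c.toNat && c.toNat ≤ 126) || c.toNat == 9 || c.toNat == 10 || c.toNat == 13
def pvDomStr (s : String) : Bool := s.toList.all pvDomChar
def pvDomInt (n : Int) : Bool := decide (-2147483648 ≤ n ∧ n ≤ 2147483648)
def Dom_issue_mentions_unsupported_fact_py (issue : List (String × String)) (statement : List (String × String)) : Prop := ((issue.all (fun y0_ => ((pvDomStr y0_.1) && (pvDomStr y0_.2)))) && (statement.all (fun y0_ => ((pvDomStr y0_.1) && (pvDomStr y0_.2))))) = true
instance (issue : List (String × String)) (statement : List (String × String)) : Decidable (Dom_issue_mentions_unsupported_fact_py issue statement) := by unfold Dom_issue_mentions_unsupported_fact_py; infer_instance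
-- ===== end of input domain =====

-- B replaces A's replace('/','-') / split() / split('-') tokenization pipeline by a single
-- character-level scanner that flushes maximal runs at whitespace, '-' and '/'; alternative algorithm, same cost.

-- ===== PORT A =====
def issue_mentions_unsupported_fact_py (issue : List (String × String)) (statement : List (String × String)) : Bool :=
  let text := PySem.Str.join " "
    [PySem.Dict.getD (PySem.Dict.mk issue) "type" "",
     PySem.Dict.getD (PySem.Dict.mk issue) "message" "",
     PySem.Dict.getD (PySem.Dict.mk issue) "evidence" ""]
  let allowed_years : PySem.Set String :=
    PySem.Set.ofList
      (([PySem.Dict.getD (PySem.Dict.mk statement) "period_start" "",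
         PySem.Dict.getD (PySem.Dict.mk statement) "period_end" "",
         PySem.Dict.getD (PySem.Dict.mk statement) "print_date" ""].filter
          (fun v => decide (4 ≤ PySem.Str.len v) && PySem.Str.strIsdigit (PySem.Str.slice v (some (-4)) none))).map
        (fun v => PySem.Str.slice v (some (-4)) none))
  -- the for-loop with early 'return True' ported as List.any (pure Bool result)
  (PySem.Str.split₀ (PySem.Str.replace text "/" "-")).any (fun token =>
    decide (4 ≤ PySem.Str.len token) &&
    ((PySem.Str.split? token "-").getD []).any (fun part =>
      (PySem.Str.len part == 4 && PySem.Str.strIsdigit part) && !(PySem.Set.contains allowed_years part)))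

-- ===== PORT B =====
def issue_mentions_unsupported_fact_py_alt (issue : List (String × String)) (statement : List (String × String)) : Bool :=
  let allowed_years : PySem.Set String :=
    PySem.Set.ofList
      (([PySem.Dict.getD (PySem.Dict.mk statement) "period_start" "",
         PySem.Dict.getD (PySem.Dict.mk statement) "period_end" "",
         PySem.Dict.getD (PySem.Dict.mk statement) "print_date" ""].filter
          (fun v => decide (4 ≤ PySem.Str.len v) && PySem.Str.strIsdigit (PySem.Str.slice v (some (-4)) none))).map
        (fun v => PySem.Str.slice v (some (-4)) none))
  let text := PySem.Str.join " "
    [PySem.Dict.getD (PySem.Dict.mk issue) "type" "",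
     PySem.Dict.getD (PySem.Dict.mk issue) "message" "",
     PySem.Dict.getD (PySem.Dict.mk issue) "evidence" ""]
  -- 'for ch in text + " "' iterates the characters of the concatenation: text.toList ++ [' '];
  -- state (found, run) as in Source B, run kept as the list of its characters
  ((text.toList ++ [' ']).foldl
    (fun (st : Bool × List Char) c =>
      if PySem.Chars.isspace c || c == '-' || c == '/' then
        (st.1 || (st.2.length == 4 && PySem.Chars.strIsdigit st.2 &&
                  !(PySem.Set.contains allowed_years (String.ofList st.2))), [])
      else (st.1, st.2 ++ [c]))
    (false, [])).1

-- ===== PRECONDITION & SPEC =====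
def Spec_issue_mentions_unsupported_fact_py (issue : List (String × String)) (statement : List (String × String)) (out : Bool) : Prop := out = issue_mentions_unsupported_fact_py_alt issue statement
instance (issue : List (String × String)) (statement : List (String × String)) (out : Bool) : Decidable (Spec_issue_mentions_unsupported_fact_py issue statement out) := by unfold Spec_issue_mentions_unsupported_fact_py; infer_instance

-- ===== CLAIM (what is proved, stated in full; the proofs are below) =====
def Claim_equal_issue_mentions_unsupported_fact_py : Prop := ∀ (issue : List (String × String)) (statement : List (String × String)), Dom_issue_mentions_unsupported_fact_py issue statement → Spec_issue_mentions_unsupported_fact_py issue statement (issue_mentions_unsupported_fact_py issue statement)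

-- ===== LEMMAS AND PROOFS =====

-- "is there a chunk satisfying Q": scan xs with pending chunk cur, flushing at delimiters d and at the end
def pvAnyChunk (d : Char → Bool) (Q : List Char → Bool) : List Char → List Char → Bool
  | [], cur => Q cur
  | c :: cs, cur => if d c then Q cur || pvAnyChunk d Q cs [] else pvAnyChunk d Q cs (cur ++ [c])

-- the same scan as a state transformer: (a complete chunk satisfied Q, the pending last chunk)
def pvProc (d : Char → Bool) (Q : List Char → Bool) : List Char → List Char → Bool × List Char
  | [], cur => (false, cur)
  | c :: cs, cur =>
      if d c then
        let r := pvProc d Q cs []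
        (Q cur || r.1, r.2)
      else pvProc d Q cs (cur ++ [c])

theorem pv_anyChunk_eq_proc (d : Char → Bool) (Q : List Char → Bool) :
    ∀ xs cur, pvAnyChunk d Q xs cur = ((pvProc d Q xs cur).1 || Q (pvProc d Q xs cur).2) := by
  intro xs
  induction xs with
  | nil => intro cur; simp [pvAnyChunk, pvProc]
  | cons c cs ih =>
      intro cur
      by_cases hc : d c = true <;> simp [pvAnyChunk, pvProc, hc, ih, Bool.or_assoc]

theorem pv_proc_append (d : Char → Bool) (Q : List Char → Bool) :
    ∀ u v cur, pvProc d Q (u ++ v) cur =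
      ((pvProc d Q u cur).1 || (pvProc d Q v ((pvProc d Q u cur).2)).1,
       (pvProc d Q v ((pvProc d Q u cur).2)).2) := by
  intro u
  induction u with
  | nil => intro v cur; simp [pvProc]
  | cons c cs ih =>
      intro v cur
      by_cases hc : d c = true <;> simp [pvProc, hc, ih, Bool.or_assoc]

-- B's foldl with the trailing sentinel delimiter is exactly the chunk scan
theorem pv_scan (d : Char → Bool) (Q : List Char → Bool) (hd : d ' ' = true) :
    ∀ (cs : List Char) (b : Bool) (run : List Char),
      ((cs ++ [' ']).foldl
        (fun (st : Bool × List Char) c => if d c then (st.1 || Q st.2, []) else (st.1, st.2 ++ [c]))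
        (b, run)).1 = (b || pvAnyChunk d Q cs run) := by
  intro cs
  induction cs with
  | nil => intro b run; simp [pvAnyChunk, hd]
  | cons c cs ih =>
      intro b run
      rw [List.cons_append, List.foldl_cons]
      by_cases hc : d c = true
      · rw [if_pos hc, ih]
        simp [pvAnyChunk, hc, Bool.or_assoc]
      · rw [if_neg hc, ih]
        simp [pvAnyChunk, hc]

-- replace with one-character old/new is a map over the characters
theorem pv_replace_go (l : List Char) : ∀ (fuel : Nat) (acc : List Char), l.length ≤ fuel →
    PySem.Chars.replace.go ['/'] ['-'] fuel l acc
      = acc.reverse ++ l.map (fun c => if c = '/' then '-' else c) := by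
  induction l with
  | nil => intro fuel acc _; cases fuel <;> simp [PySem.Chars.replace.go]
  | cons c t ih =>
      intro fuel acc hf
      cases fuel with
      | zero => simp at hf
      | succ n =>
          have hlen : t.length ≤ n := by simp at hf; omega
          by_cases hc : c = '/'
          · subst hc
            have hpre : (['/'].isPrefixOf ('/' :: t)) = true := by simp [List.isPrefixOf]
            rw [PySem.Chars.replace.go.eq_def]
            simp [hpre, ih n ('-' :: acc) hlen]
          · have hpre : (['/'].isPrefixOf (c :: t)) = false := by
              have hbc : ('/' == c) = false := beq_eq_false_iff_ne.mpr (Ne.symm hc)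
              simp [List.isPrefixOf, hbc]
            rw [PySem.Chars.replace.go.eq_def]
            simp [hpre, ih n (c :: acc) hlen, hc]

theorem pv_replace (s : List Char) :
    PySem.Chars.replace s ['/'] ['-'] = s.map (fun c => if c = '/' then '-' else c) := by
  simpa [PySem.Chars.replace] using pv_replace_go s s.length [] (le_refl _)

-- splitOn on "-" judged by any Q is the dash chunk scan
theorem pv_splitOn_go_any (Q : List Char → Bool) :
    ∀ (l : List Char) (fuel : Nat) (cur : List Char) (acc : List (List Char)), l.length ≤ fuel →
      (PySem.Chars.splitOn.go ['-'] fuel l cur acc).any Q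
        = (acc.any Q || pvAnyChunk (fun c => c == '-') Q l cur.reverse) := by
  intro l
  induction l with
  | nil =>
      intro fuel cur acc _
      cases fuel <;> simp [PySem.Chars.splitOn.go, pvAnyChunk, Bool.or_comm]
  | cons c t ih =>
      intro fuel cur acc hf
      cases fuel with
      | zero => simp at hf
      | succ n =>
          have hlen : t.length ≤ n := by simp at hf; omega
          by_cases hc : c = '-'
          · subst hc
            have hpre : (['-'].isPrefixOf ('-' :: t)) = true := by simp [List.isPrefixOf]
            rw [PySem.Chars.splitOn.go.eq_def]
            simp [hpre, ih n [] (cur.reverse :: acc) hlen,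
              pvAnyChunk, Bool.or_assoc, Bool.or_left_comm, Bool.or_comm]
          · have hpre : (['-'].isPrefixOf (c :: t)) = false := by
              have hbc : ('-' == c) = false := beq_eq_false_iff_ne.mpr (Ne.symm hc)
              simp [List.isPrefixOf, hbc]
            rw [PySem.Chars.splitOn.go.eq_def]
            simp [hpre, ih n (c :: cur) acc hlen, pvAnyChunk, hc]

theorem pv_splitOn_any (Q : List Char → Bool) (t : List Char) :
    (PySem.Chars.splitOn t ['-']).any Q = pvAnyChunk (fun c => c == '-') Q t [] := by
  simpa using pv_splitOn_go_any Q t (t.length + 1) [] [] (by omega)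

-- a chunk satisfying a length-4 predicate forces length ≥ 4 of the scanned text
theorem pv_anyChunk_len (Q : List Char → Bool) (hQ : ∀ cs, Q cs = true → cs.length = 4) :
    ∀ (t cur : List Char), pvAnyChunk (fun c => c == '-') Q t cur = true →
      4 ≤ cur.length + t.length := by
  intro t
  induction t with
  | nil =>
      intro cur h
      simp [pvAnyChunk] at h
      simpa using (hQ cur h).ge
  | cons c cs ih =>
      intro cur h
      by_cases hc : (c == '-') = true <;> simp [pvAnyChunk, hc] at h
      · rcases h with h | h
        · have := hQ _ h; simp; omega
        · have := ih [] h; simp at this ⊢; omega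
      · have := ih (cur ++ [c]) h; simp at this ⊢; omega

-- split₀ judged by any g (with g [] = false) is the whitespace chunk scan
theorem pv_split₀_go_any (g : List Char → Bool) (hg : g [] = false) :
    ∀ (l cur : List Char) (acc : List (List Char)),
      (PySem.Chars.split₀.go l cur acc).any g
        = (acc.any g || pvAnyChunk PySem.Chars.isspace g l cur.reverse) := by
  intro l
  induction l with
  | nil =>
      intro cur acc
      cases cur <;> simp [PySem.Chars.split₀.go, pvAnyChunk, hg, Bool.or_comm]
  | cons c t ih =>
      intro cur acc
      by_cases hc : PySem.Chars.isspace c = true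
      · cases cur with
        | nil => simp [PySem.Chars.split₀.go, hc, ih, pvAnyChunk, hg]
        | cons c' cur' =>
            simp [PySem.Chars.split₀.go, hc, ih, pvAnyChunk, Bool.or_assoc,
              Bool.or_left_comm, Bool.or_comm]
      · simp [PySem.Chars.split₀.go, hc, ih, pvAnyChunk]

theorem pv_split₀_any (g : List Char → Bool) (hg : g [] = false) (s : List Char) :
    (PySem.Chars.split₀ s).any g = pvAnyChunk PySem.Chars.isspace g s [] := by
  simpa using pv_split₀_go_any g hg s [] []

-- two-level chunking (whitespace tokens, each dash-chunked) = one-level chunking at both delimiters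
theorem pv_nest (P : List Char → Bool) :
    ∀ (s cur : List Char),
      pvAnyChunk PySem.Chars.isspace (fun t => pvAnyChunk (fun c => c == '-') P t []) s cur
        = ((pvProc (fun c => c == '-') P cur []).1 ||
           pvAnyChunk (fun c => PySem.Chars.isspace c || c == '-') P s
             ((pvProc (fun c => c == '-') P cur []).2)) := by
  intro s
  induction s with
  | nil =>
      intro cur
      simp [pvAnyChunk, pv_anyChunk_eq_proc]
  | cons c cs ih =>
      intro cur
      by_cases hw : PySem.Chars.isspace c = true
      · have hd : (PySem.Chars.isspace c || c == '-') = true := by simp [hw]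
        simp only [pvAnyChunk, hw, if_true, hd, ih, pvProc]
        simp [pv_anyChunk_eq_proc, Bool.or_assoc, Bool.or_comm, Bool.or_left_comm]
      · by_cases hc : c = '-'
        · subst hc
          have hd : (PySem.Chars.isspace '-' || '-' == '-') = true := by simp
          simp only [pvAnyChunk, hw, if_false, Bool.false_or, hd, if_true, ih,
            pv_proc_append, pvProc]
          simp [Bool.or_assoc]
        · have hd : (PySem.Chars.isspace c || c == '-') = false := by simp [hw, hc]
          simp only [pvAnyChunk, hw, if_false, hd, ih, pv_proc_append, pvProc, hc]
          simp [hc]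

-- mapping '/'→'-' turns the three-delimiter scan into the two-delimiter scan
theorem pv_anyChunk_map (P : List Char → Bool) :
    ∀ (s cur : List Char),
      pvAnyChunk (fun c => PySem.Chars.isspace c || c == '-') P
        (s.map (fun c => if c = '/' then '-' else c)) cur
        = pvAnyChunk (fun c => PySem.Chars.isspace c || c == '-' || c == '/') P s cur := by
  intro s
  induction s with
  | nil => intro cur; simp [pvAnyChunk]
  | cons c cs ih =>
      intro cur
      by_cases hc : c = '/'
      · subst hc
        have hw : PySem.Chars.isspace '/' = false := by decide
        simp [pvAnyChunk, ih, hw]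
      · by_cases hd : (PySem.Chars.isspace c || c == '-') = true
        · simp [pvAnyChunk, hc, hd, ih, List.map_cons]
        · have : (PySem.Chars.isspace c || c == '-' || c == '/') = false := by
            simp at hd; simp [hd, hc]
          simp at hd
          simp [pvAnyChunk, hc, hd, this, ih]

-- A's whole token pipeline, at character level, is the three-delimiter chunk scan
theorem pv_main (P : List Char → Bool) (hP4 : ∀ cs, P cs = true → cs.length = 4)
    (hPnil : P [] = false) (s : List Char) :
    ((PySem.Chars.split₀ (PySem.Chars.replace s ['/'] ['-'])).any (fun t =>
        decide (4 ≤ (t.length : Int)) && (PySem.Chars.splitOn t ['-']).any P))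
    = pvAnyChunk (fun c => PySem.Chars.isspace c || c == '-' || c == '/') P s [] := by
  rw [pv_replace]
  have hg : ∀ t : List Char, (decide (4 ≤ (t.length : Int)) && (PySem.Chars.splitOn t ['-']).any P)
      = pvAnyChunk (fun c => c == '-') P t [] := by
    intro t
    rw [pv_splitOn_any]
    cases hch : pvAnyChunk (fun c => c == '-') P t [] with
    | false => simp
    | true =>
        have hlen := pv_anyChunk_len P hP4 t [] hch
        simp only [List.length_nil, Nat.zero_add] at hlen
        simp only [Bool.and_true, decide_eq_true_eq]
        exact_mod_cast hlen
  simp only [hg]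
  rw [pv_split₀_any _ (by simp [pvAnyChunk, hPnil])]
  rw [pv_nest]
  simp [pvProc, pv_anyChunk_map]

-- ===== VERDICT (by name: the statement is the Claim_ definition above) =====
theorem issue_mentions_unsupported_fact_py_spec : Claim_equal_issue_mentions_unsupported_fact_py := by
  intro issue statement _
  unfold Spec_issue_mentions_unsupported_fact_py
  unfold issue_mentions_unsupported_fact_py issue_mentions_unsupported_fact_py_alt
  set allowed : PySem.Set String :=
    PySem.Set.ofList
      (([PySem.Dict.getD (PySem.Dict.mk statement) "period_start" "",
         PySem.Dict.getD (PySem.Dict.mk statement) "period_end" "",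
         PySem.Dict.getD (PySem.Dict.mk statement) "print_date" ""].filter
          (fun v => decide (4 ≤ PySem.Str.len v) && PySem.Str.strIsdigit (PySem.Str.slice v (some (-4)) none))).map
        (fun v => PySem.Str.slice v (some (-4)) none)) with hallowed
  set text := PySem.Str.join " "
    [PySem.Dict.getD (PySem.Dict.mk issue) "type" "",
     PySem.Dict.getD (PySem.Dict.mk issue) "message" "",
     PySem.Dict.getD (PySem.Dict.mk issue) "evidence" ""] with htext
  have hp4 : ∀ cs : List Char,
      (cs.length == 4 && PySem.Chars.strIsdigit cs &&
        !(PySem.Set.contains allowed (String.ofList cs))) = true → cs.length = 4 := by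
    intro cs h
    simp only [Bool.and_eq_true, beq_iff_eq] at h
    exact h.1.1
  have hnil : (([] : List Char).length == 4 && PySem.Chars.strIsdigit [] &&
      !(PySem.Set.contains allowed (String.ofList []))) = false := by simp
  rw [pv_scan (fun c => PySem.Chars.isspace c || c == '-' || c == '/')
        (fun cs => cs.length == 4 && PySem.Chars.strIsdigit cs &&
          !(PySem.Set.contains allowed (String.ofList cs)))
        (by decide) text.toList false [], Bool.false_or]
  rw [← pv_main _ hp4 hnil text.toList]
  have hbeq : ∀ n : Nat, ((n : Int) == (4 : Int)) = (n == 4) := by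
    intro n
    rw [Bool.eq_iff_iff]
    simp only [beq_iff_eq]
    omega
  simp only [PySem.Str.split₀, PySem.Str.replace, PySem.Str.split?, PySem.Chars.split?,
    PySem.Str.len, PySem.Str.strIsdigit, String.toList_ofList,
    show ("/" : String).toList = ['/'] from rfl, show ("-" : String).toList = ['-'] from rfl,
    List.isEmpty_cons, Bool.false_eq_true, if_false, Option.map_some, Option.getD_some,
    List.any_map, Function.comp, hbeq]
  simp [Function.comp_def]
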